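-- pv_equiv track=rewrite | github.com/Hassnaa-H/Python_Game_GP_B | backend.py | get_treasure_position
-- ===== SOURCE A (Python) =====
-- LEVEL_SEQUENCES = {
--     'Level_1': ['right','right','right','right','down','down','left','left','left','left','down','down','right','right','right','right'],
--     'Level_2': ['right', 'right','right','down','down', 'right'],
--     'Level_3': ['right', 'right','right','right', 'down', 'down','left', 'left', 'left', 'down', 'down','right','right','right'],
--     'Level_4': ['right', 'up','right','right','right','right','down', 'down','right', 'right'],
--     'Level_5': ['right', 'right', 'right', 'right','right', 'down', 'down','left', 'left', 'left', 'left','left', 'down', 'down','right', 'right', 'right', 'right','right','down', 'down','right'],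
--     'Level_6': ['right', 'right', 'right', 'right','right','down', 'down','left', 'left', 'left','left','left','down', 'down'],
--     'Level_7': ['right','right','right','right','right', 'down', 'down','left', 'left', 'left','left','left','down', 'down','right', 'right', 'right', 'right','right','down', 'down'],
--     'Level_8': ['right','up', 'right', 'right', 'right','right','up', 'right', 'right','down'],
--     'Level_9': ['down','down', 'right', 'down','down','up', 'up','up','up' ,'right', 'right','down', 'right', 'left', 'left','down','down','down', 'right','right','right','left','left','down','down','down', 'right', 'right'],
--     'Level_10': ['down','down', 'right', 'up','up', 'right', 'right','down', 'left', 'down','down','down', 'right', 'down','down','down', 'right', 'right','down']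
-- }
--
-- def get_treasure_position(level):
--     target = LEVEL_SEQUENCES.get(level, [])
--     x, y = 0, 0
--
--     for move in target:
--         if move == "right":
--             x += 1
--         elif move == "left":
--             x -= 1
--         elif move == "up":
--             y -= 1
--         elif move == "down":
--             y += 1
--
--     return x, y
-- ===== SOURCE B (Python) =====
-- # Each level's move sequence is encoded as a compact string of direction codes
-- # (R/L/U/D); the final coordinate is a closed form over character counts.
-- LEVEL_CODES = {
--     'Level_1': 'RRRRDDLLLLDDRRRR',
--     'Level_2': 'RRRDDR',
--     'Level_3': 'RRRRDDLLLDDRRR',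
--     'Level_4': 'RURRRRDDRR',
--     'Level_5': 'RRRRRDDLLLLLDDRRRRRDDR',
--     'Level_6': 'RRRRRDDLLLLLDD',
--     'Level_7': 'RRRRRDDLLLLLDDRRRRRDD',
--     'Level_8': 'RURRRRURRD',
--     'Level_9': 'DDRDDUUUURRDRLLDDDRRRLLDDDRR',
--     'Level_10': 'DDRUURRDLDDDRDDDRRD',
-- }
--
-- def get_treasure_position(level):
--     code = LEVEL_CODES.get(level, '')
--     return (code.count('R') - code.count('L'),
--             code.count('D') - code.count('U'))
-- ===== Notes on version B (the rewrite author's own statement) =====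
-- stated objective: alternative
-- what changed: Replaced the per-move four-way branch-and-increment loop over a list of move words by a compact per-level direction-code string (R/L/U/D) whose final coordinate is the closed form (count 'R' - count 'L', count 'D' - count 'U').
import Mathlib
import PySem

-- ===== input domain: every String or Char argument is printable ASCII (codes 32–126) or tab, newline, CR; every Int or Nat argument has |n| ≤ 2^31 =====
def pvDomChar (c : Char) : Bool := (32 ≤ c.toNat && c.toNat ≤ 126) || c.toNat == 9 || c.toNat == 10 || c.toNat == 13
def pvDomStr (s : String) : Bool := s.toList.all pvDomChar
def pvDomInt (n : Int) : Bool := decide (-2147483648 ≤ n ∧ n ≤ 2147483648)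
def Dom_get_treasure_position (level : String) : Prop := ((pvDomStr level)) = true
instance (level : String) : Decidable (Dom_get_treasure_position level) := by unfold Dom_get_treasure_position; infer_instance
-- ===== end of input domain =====

-- B stores each level as a compact direction-code string (R/L/U/D) and returns the
-- closed form (count 'R' - count 'L', count 'D' - count 'U'); objective: alternative.

-- ===== PORT A =====
def LEVEL_SEQUENCES : PySem.Dict String (List String) :=
  PySem.Dict.ofList [("Level_1", ["right","right","right","right","down","down","left","left","left","left","down","down","right","right","right","right"]),
   ("Level_2", ["right","right","right","down","down","right"]),
   ("Level_3", ["right","right","right","right","down","down","left","left","left","down","down","right","right","right"]),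
   ("Level_4", ["right","up","right","right","right","right","down","down","right","right"]),
   ("Level_5", ["right","right","right","right","right","down","down","left","left","left","left","left","down","down","right","right","right","right","right","down","down","right"]),
   ("Level_6", ["right","right","right","right","right","down","down","left","left","left","left","left","down","down"]),
   ("Level_7", ["right","right","right","right","right","down","down","left","left","left","left","left","down","down","right","right","right","right","right","down","down"]),
   ("Level_8", ["right","up","right","right","right","right","up","right","right","down"]),
   ("Level_9", ["down","down","right","down","down","up","up","up","up","right","right","down","right","left","left","down","down","down","right","right","right","left","left","down","down","down","right","right"]),
   ("Level_10", ["down","down","right","up","up","right","right","down","left","down","down","down","right","down","down","down","right","right","down"])]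

def get_treasure_position (level : String) : Int × Int :=
  let target := PySem.Dict.getD LEVEL_SEQUENCES level []
  let p := target.foldl (fun (p : Int × Int) move =>
      if move == "right" then (p.1 + 1, p.2)
      else if move == "left" then (p.1 - 1, p.2)
      else if move == "up" then (p.1, p.2 - 1)
      else if move == "down" then (p.1, p.2 + 1)
      else p) (0, 0)
  (p.1, p.2)

-- ===== PORT B =====
def LEVEL_CODES : PySem.Dict String String :=
  PySem.Dict.ofList [("Level_1", "RRRRDDLLLLDDRRRR"),
   ("Level_2", "RRRDDR"),
   ("Level_3", "RRRRDDLLLDDRRR"),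
   ("Level_4", "RURRRRDDRR"),
   ("Level_5", "RRRRRDDLLLLLDDRRRRRDDR"),
   ("Level_6", "RRRRRDDLLLLLDD"),
   ("Level_7", "RRRRRDDLLLLLDDRRRRRDD"),
   ("Level_8", "RURRRRURRD"),
   ("Level_9", "DDRDDUUUURRDRLLDDDRRRLLDDDRR"),
   ("Level_10", "DDRUURRDLDDDRDDDRRD")]

def get_treasure_position_alt (level : String) : Int × Int :=
  let code := PySem.Dict.getD LEVEL_CODES level ""
  ((PySem.Str.count code "R" : Int) - (PySem.Str.count code "L" : Int),
   (PySem.Str.count code "D" : Int) - (PySem.Str.count code "U" : Int))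

-- ===== PRECONDITION & SPEC =====
def Spec_get_treasure_position (level : String) (out : Int × Int) : Prop := out = get_treasure_position_alt level
instance (level : String) (out : Int × Int) : Decidable (Spec_get_treasure_position level out) := by unfold Spec_get_treasure_position; infer_instance

-- ===== CLAIM =====
def Claim_equal_get_treasure_position : Prop := ∀ (level : String), Dom_get_treasure_position level → Spec_get_treasure_position level (get_treasure_position level)

-- ===== LEMMAS AND PROOFS =====

-- ===== VERDICT =====
theorem get_treasure_position_spec : Claim_equal_get_treasure_position := by
  intro level _
  unfold Spec_get_treasure_position
  by_cases h1 : level = "Level_1"; · subst h1; decide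
  by_cases h2 : level = "Level_2"; · subst h2; decide
  by_cases h3 : level = "Level_3"; · subst h3; decide
  by_cases h4 : level = "Level_4"; · subst h4; decide
  by_cases h5 : level = "Level_5"; · subst h5; decide
  by_cases h6 : level = "Level_6"; · subst h6; decide
  by_cases h7 : level = "Level_7"; · subst h7; decide
  by_cases h8 : level = "Level_8"; · subst h8; decide
  by_cases h9 : level = "Level_9"; · subst h9; decide
  by_cases h10 : level = "Level_10"; · subst h10; decide
  have hkA : LEVEL_SEQUENCES.keys = ["Level_1","Level_2","Level_3","Level_4","Level_5","Level_6","Level_7","Level_8","Level_9","Level_10"] := by decide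
  have hkB : LEVEL_CODES.keys = ["Level_1","Level_2","Level_3","Level_4","Level_5","Level_6","Level_7","Level_8","Level_9","Level_10"] := by decide
  have hA : PySem.Dict.getD LEVEL_SEQUENCES level [] = [] := by
    apply PySem.Dict.getD_of_not_contains
    rw [PySem.Dict.contains_eq_decide_mem_keys, hkA]
    simp [h1, h2, h3, h4, h5, h6, h7, h8, h9, h10]
  have hB : PySem.Dict.getD LEVEL_CODES level "" = "" := by
    apply PySem.Dict.getD_of_not_contains
    rw [PySem.Dict.contains_eq_decide_mem_keys, hkB]
    simp [h1, h2, h3, h4, h5, h6, h7, h8, h9, h10]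
  simp [get_treasure_position, get_treasure_position_alt, hA, hB, PySem.Str.count]
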